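-- pv_equiv track=rewrite | github.com/Tushaar28/CodeForces | 155A.py | func
-- ===== SOURCE A (Python) =====
-- def func(arr, n):
--     cnt = 0
--     high = low = arr[0]
--     for i in range(1, n):
--         if(high < arr[i]):
--             high = arr[i]
--             cnt += 1
--         if(low > arr[i]):
--             low = arr[i]
--             cnt += 1
--     return cnt
-- ===== SOURCE B (Python) =====
-- def func(arr, n):
--     w = [arr[i] for i in range(n)]
--     highs = []
--     lows = []
--     for x in w:
--         highs.append(x if not highs or highs[-1] < x else highs[-1])
--         lows.append(x if not lows or lows[-1] > x else lows[-1])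
--     return sum(1 for a, b in zip(highs, highs[1:]) if a < b) + \
--            sum(1 for a, b in zip(lows, lows[1:]) if a > b)
-- ===== Notes on version B (the rewrite author's own statement) =====
-- stated objective: alternative
-- what changed: A updates a running max/min and a counter inside one indexed loop; B first materialises the window arr[0:n], builds the prefix-maximum and prefix-minimum tables, and then counts adjacent strict changes in each table with a zip pass.
-- crash fix: On arr == [] with n <= 0 A raises IndexError at arr[0] before its loop, while B's comprehension over range(n) is empty and B returns 0. — e.g. on func([], 0): A raises IndexError, B returns 0
import Mathlib
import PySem

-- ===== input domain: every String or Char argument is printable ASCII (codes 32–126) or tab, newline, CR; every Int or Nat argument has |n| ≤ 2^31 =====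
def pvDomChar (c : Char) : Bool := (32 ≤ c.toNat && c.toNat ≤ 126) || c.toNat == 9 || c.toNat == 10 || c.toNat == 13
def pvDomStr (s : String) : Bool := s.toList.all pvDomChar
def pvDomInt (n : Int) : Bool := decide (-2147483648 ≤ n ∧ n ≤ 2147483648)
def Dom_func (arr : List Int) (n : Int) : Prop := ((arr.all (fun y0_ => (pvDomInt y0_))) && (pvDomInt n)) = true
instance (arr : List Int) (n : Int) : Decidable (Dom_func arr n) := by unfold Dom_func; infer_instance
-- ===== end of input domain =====

-- B replaces A's single running-max/min-and-counter loop by prefix-extrema tables plus an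
-- adjacent-pair counting pass (alternative decomposition, same cost).

-- ===== PORT A =====
def func (arr : List Int) (n : Int) : Int :=
  let init := PySem.List.pyGetD arr 0 0      -- arr[0]; Pre_ keeps the index in range
  ((PySem.List.pyRange 1 n).foldl (fun (s : Int × Int × Int) i =>
      let x := PySem.List.pyGetD arr i 0     -- arr[i]; in range under Pre_
      let s := if s.2.1 < x then (s.1 + 1, x, s.2.2) else s
      let s := if s.2.2 > x then (s.1 + 1, s.2.1, x) else s
      s) (0, init, init)).1

-- ===== PORT B =====
def func_alt (arr : List Int) (n : Int) : Int :=
  let w := (PySem.List.pyRange 0 n).map (fun i => PySem.List.pyGetD arr i 0)  -- [arr[i] for i in range(n)]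
  let highs := w.foldl (fun hs x =>
      hs ++ [if hs.isEmpty || decide (PySem.List.pyGetD hs (-1) 0 < x) then x
             else PySem.List.pyGetD hs (-1) 0]) []
  let lows := w.foldl (fun ls x =>
      ls ++ [if ls.isEmpty || decide (PySem.List.pyGetD ls (-1) 0 > x) then x
             else PySem.List.pyGetD ls (-1) 0]) []
  ((highs.zip (PySem.List.slice highs (some 1) none)).countP (fun q => decide (q.1 < q.2)) : Int)
  + ((lows.zip (PySem.List.slice lows (some 1) none)).countP (fun q => decide (q.1 > q.2)) : Int)

-- ===== PRECONDITION & SPEC =====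
-- A raises IndexError exactly when arr is empty (arr[0]) or n exceeds len(arr) (arr[i] in the loop).
def Pre_func (arr : List Int) (n : Int) : Prop := arr ≠ [] ∧ n ≤ arr.length
instance (arr : List Int) (n : Int) : Decidable (Pre_func arr n) := by unfold Pre_func; infer_instance
def pvWitness_func : List Int × Int := ([2, 1, 3], 3)

-- On arr == [] with n <= 0 A raises IndexError at arr[0], while B's window comprehension is empty and B returns 0.
def Raises_func (arr : List Int) (n : Int) : Prop := arr = [] ∧ n ≤ 0
instance (arr : List Int) (n : Int) : Decidable (Raises_func arr n) := by unfold Raises_func; infer_instance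
def pvRaiseWitness_func : List Int × Int := ([], 0)
def pvRaiseWitnessOut_func : Int := 0

def Spec_func (arr : List Int) (n : Int) (out : Int) : Prop := out = func_alt arr n
instance (arr : List Int) (n : Int) (out : Int) : Decidable (Spec_func arr n out) := by unfold Spec_func; infer_instance

-- ===== CLAIM (what is proved, stated in full; the proofs are below) =====
def Claim_equal_func : Prop := ∀ (arr : List Int) (n : Int), Dom_func arr n → Pre_func arr n → Spec_func arr n (func arr n)
def Claim_raises_func : Prop := (∀ (arr : List Int) (n : Int), Dom_func arr n → Raises_func arr n → ¬ Pre_func arr n) ∧ (Dom_func (pvRaiseWitness_func.1) (pvRaiseWitness_func.2) ∧ Raises_func (pvRaiseWitness_func.1) (pvRaiseWitness_func.2) ∧ func_alt (pvRaiseWitness_func.1) (pvRaiseWitness_func.2) = pvRaiseWitnessOut_func)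

-- ===== LEMMAS AND PROOFS =====

-- A's loop body as a step function on its (cnt, high, low) state.
def stepA (s : Int × Int × Int) (x : Int) : Int × Int × Int :=
  let s := if s.2.1 < x then (s.1 + 1, x, s.2.2) else s
  let s := if s.2.2 > x then (s.1 + 1, s.2.1, x) else s
  s

-- prefix-maximum / prefix-minimum tables (mathematical form of B's table-building fold)
def scanMax (h : Int) : List Int → List Int
  | [] => []
  | x :: t => max h x :: scanMax (max h x) t

def scanMin (l : Int) : List Int → List Int
  | [] => []
  | x :: t => min l x :: scanMin (min l x) t

@[simp] lemma scanMax_nil (h : Int) : scanMax h [] = [] := rfl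
@[simp] lemma scanMin_nil (l : Int) : scanMin l [] = [] := rfl

-- number of adjacent pairs satisfying p (mathematical form of B's zip pass)
def adj (p : Int → Int → Prop) [DecidableRel p] : List Int → Int
  | a :: b :: t => (if p a b then 1 else 0) + adj p (b :: t)
  | _ => 0

@[simp] lemma adj_nil (p : Int → Int → Prop) [DecidableRel p] : adj p [] = 0 := rfl
@[simp] lemma adj_single (p : Int → Int → Prop) [DecidableRel p] (a : Int) : adj p [a] = 0 := rfl
@[simp] lemma adj_cons₂ (p : Int → Int → Prop) [DecidableRel p] (a b : Int) (t : List Int) :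
    adj p (a :: b :: t) = (if p a b then 1 else 0) + adj p (b :: t) := rfl

lemma stepA_eq (c h l x : Int) :
    stepA (c, h, l) x = (c + (if h < x then 1 else 0) + (if l > x then 1 else 0), max h x, min l x) := by
  simp only [stepA]
  split_ifs <;> simp_all <;> omega

theorem foldl_stepA (t : List Int) : ∀ (c h l : Int),
    (t.foldl stepA (c, h, l)).1
      = c + adj (· < ·) (h :: scanMax h t) + adj (· > ·) (l :: scanMin l t) := by
  induction t with
  | nil => intro c h l; simp
  | cons x t ih =>
    intro c h l
    have hlt : (if h < max h x then (1:Int) else 0) = (if h < x then 1 else 0) := by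
      split_ifs <;> omega
    have hgt : (if l > min l x then (1:Int) else 0) = (if l > x then 1 else 0) := by
      split_ifs <;> omega
    simp only [List.foldl_cons, stepA_eq, scanMax, scanMin, adj_cons₂, ih, hlt, hgt]
    ring

-- B's table-building fold appends the prefix extrema
theorem foldl_high (t : List Int) : ∀ (pre : List Int) (h : Int),
    t.foldl (fun hs x =>
        hs ++ [if hs.isEmpty || decide (PySem.List.pyGetD hs (-1) 0 < x) then x
               else PySem.List.pyGetD hs (-1) 0]) (pre ++ [h])
      = pre ++ [h] ++ scanMax h t := by
  induction t with
  | nil => intro pre h; simp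
  | cons x t ih =>
    intro pre h
    have hm : (if (pre ++ [h]).isEmpty || decide (PySem.List.pyGetD (pre ++ [h]) (-1) 0 < x) then x
               else PySem.List.pyGetD (pre ++ [h]) (-1) 0) = max h x := by
      simp [PySem.List.pyGetD_neg_one_append_singleton]
      split_ifs <;> omega
    simp only [List.foldl_cons, hm, scanMax]
    rw [show pre ++ [h] ++ [max h x] = (pre ++ [h]) ++ [max h x] from rfl, ih]
    simp

theorem foldl_low (t : List Int) : ∀ (pre : List Int) (l : Int),
    t.foldl (fun ls x =>
        ls ++ [if ls.isEmpty || decide (PySem.List.pyGetD ls (-1) 0 > x) then x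
               else PySem.List.pyGetD ls (-1) 0]) (pre ++ [l])
      = pre ++ [l] ++ scanMin l t := by
  induction t with
  | nil => intro pre l; simp
  | cons x t ih =>
    intro pre l
    have hm : (if (pre ++ [l]).isEmpty || decide (PySem.List.pyGetD (pre ++ [l]) (-1) 0 > x) then x
               else PySem.List.pyGetD (pre ++ [l]) (-1) 0) = min l x := by
      simp [PySem.List.pyGetD_neg_one_append_singleton]
      split_ifs <;> omega
    simp only [List.foldl_cons, hm, scanMin]
    rw [show pre ++ [l] ++ [min l x] = (pre ++ [l]) ++ [min l x] from rfl, ih]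
    simp

lemma zip_adj (p : Int → Int → Prop) [DecidableRel p] :
    ∀ (l : List Int), ((l.zip l.tail).countP (fun q => decide (p q.1 q.2)) : Int) = adj p l := by
  intro l
  induction l with
  | nil => simp
  | cons a t ih =>
    cases t with
    | nil => simp
    | cons b t' =>
      have hz : (a :: b :: t').zip (b :: t') = (a, b) :: (b :: t').zip t' := rfl
      rw [List.tail_cons, hz, List.countP_cons, adj_cons₂, ← ih, List.tail_cons]
      push_cast
      by_cases h : p a b <;> simp [h] <;> ring

-- the window segment: the comprehension's values are a contiguous segment of arr
lemma map_seg (arr : List Int) (j b : Int) (hj : 0 ≤ j) (hb : b ≤ arr.length) :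
    (PySem.List.pyRange j b).map (fun i => PySem.List.pyGetD arr i 0)
      = (arr.drop j.toNat).take (b - j).toNat := by
  rw [PySem.List.pyRange_one, List.map_map]
  apply List.ext_getElem
  · simp; omega
  · intro i h1' h2'
    simp only [List.getElem_map, List.getElem_range, Function.comp_apply,
      List.getElem_take, List.getElem_drop]
    have hilt : (i : Int) < b - j := by simp at h1'; omega
    rw [PySem.List.pyGetD_eq_getElem arr 0 (by omega) (by push_cast; omega)]
    congr 1
    omega

lemma slice_one_tail (l : List Int) : PySem.List.slice l (some 1) none = l.tail := by
  have : (1 : Int) = ((1 : Nat) : Int) := rfl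
  rw [this, PySem.List.slice_from_natCast, List.drop_one]

-- ===== VERDICT (by name: the statement is the Claim_ definition above) =====
theorem func_spec : Claim_equal_func := by
  intro arr n _ hpre
  obtain ⟨hne, hlen⟩ := hpre
  unfold Spec_func
  match arr, hne with
  | a :: rest, _ =>
  by_cases hn : n ≤ 0
  · -- empty loop / empty window
    have h1 : PySem.List.pyRange 1 n = [] := PySem.List.pyRange_one_eq_nil (by omega)
    have h0 : PySem.List.pyRange 0 n = [] := PySem.List.pyRange_one_eq_nil (by omega)
    simp [func, func_alt, h1, h0]
  · -- 1 ≤ n : both sides reduce over the same segment t = rest.take (n-1)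
    push_neg at hn
    have hn1 : (1:Int) ≤ n := by omega
    set t : List Int := (rest.take ((n - 1).toNat)) with ht
    -- A's side
    have hsegA : (PySem.List.pyRange 1 n).map (fun i => PySem.List.pyGetD (a :: rest) i 0) = t := by
      rw [map_seg (a :: rest) 1 n (by omega) hlen]
      simp [ht]
    have hA : func (a :: rest) n
        = 0 + adj (· < ·) (a :: scanMax a t) + adj (· > ·) (a :: scanMin a t) := by
      show ((PySem.List.pyRange 1 n).foldl (fun s i => stepA s (PySem.List.pyGetD (a :: rest) i 0)) (0, PySem.List.pyGetD (a :: rest) 0 0, PySem.List.pyGetD (a :: rest) 0 0)).1 = _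
      rw [← List.foldl_map, hsegA]
      simp only [PySem.List.pyGetD_zero_cons]
      exact foldl_stepA t 0 a a
    -- B's side
    have hsegB : (PySem.List.pyRange 0 n).map (fun i => PySem.List.pyGetD (a :: rest) i 0) = a :: t := by
      rw [map_seg (a :: rest) 0 n (by omega) hlen]
      have hnt : (n - 0).toNat = (n - 1).toNat + 1 := by omega
      simp only [Int.toNat_zero, List.drop_zero, hnt, List.take_succ_cons]
      simp [ht]
    have hB : func_alt (a :: rest) n
        = adj (· < ·) (a :: scanMax a t) + adj (· > ·) (a :: scanMin a t) := by
      simp only [func_alt, hsegB]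
      have hh : (a :: t).foldl (fun hs x =>
          hs ++ [if hs.isEmpty || decide (PySem.List.pyGetD hs (-1) 0 < x) then x
                 else PySem.List.pyGetD hs (-1) 0]) [] = a :: scanMax a t := by
        have : ([] : List Int) ++ [a] = [a] := rfl
        simpa [this] using foldl_high t [] a
      have hl : (a :: t).foldl (fun ls x =>
          ls ++ [if ls.isEmpty || decide (PySem.List.pyGetD ls (-1) 0 > x) then x
                 else PySem.List.pyGetD ls (-1) 0]) [] = a :: scanMin a t := by
        simpa using foldl_low t [] a
      rw [hh, hl, slice_one_tail, slice_one_tail]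
      have z1 := zip_adj (· < ·) (a :: scanMax a t)
      have z2 := zip_adj (· > ·) (a :: scanMin a t)
      simp only [List.tail_cons] at z1 z2
      simp only [List.tail_cons]
      rw [z1, z2]
    rw [hA, hB]; ring

@[simp] theorem func_raises : Claim_raises_func := by
  unfold Claim_raises_func
  constructor
  · rintro arr n _ ⟨hnil, _⟩ ⟨hne, _⟩; exact hne hnil
  · exact ⟨by decide, by decide, by decide⟩
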